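-- pv_equiv track=rewrite | github.com/olegbrz/Data-Structures-and-Algorithms | Unit 3/Python/suma_recursiva.py | suma_recursiva
-- ===== SOURCE A (Python) =====
-- def suma_recursiva(A, izq, der):
--     m, s = 0, 0
--     if izq == der:
--         s = A[izq]
--     else:
--         m = (izq + der) // 2
--         s = suma_recursiva(A, izq, m) + suma_recursiva(A, m + 1, der)
--     return s
-- ===== SOURCE B (Python) =====
-- def suma_recursiva(A, izq, der):
--     s = A[izq]
--     for i in range(izq + 1, der + 1):
--         s += A[i]
--     return s
-- ===== Notes on version B (the rewrite author's own statement) =====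
-- stated objective: simpler
-- what changed: Replaces the divide-and-conquer midpoint recursion with a single iterative accumulation loop seeded with A[izq] and running over range(izq+1, der+1).
import Mathlib
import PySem

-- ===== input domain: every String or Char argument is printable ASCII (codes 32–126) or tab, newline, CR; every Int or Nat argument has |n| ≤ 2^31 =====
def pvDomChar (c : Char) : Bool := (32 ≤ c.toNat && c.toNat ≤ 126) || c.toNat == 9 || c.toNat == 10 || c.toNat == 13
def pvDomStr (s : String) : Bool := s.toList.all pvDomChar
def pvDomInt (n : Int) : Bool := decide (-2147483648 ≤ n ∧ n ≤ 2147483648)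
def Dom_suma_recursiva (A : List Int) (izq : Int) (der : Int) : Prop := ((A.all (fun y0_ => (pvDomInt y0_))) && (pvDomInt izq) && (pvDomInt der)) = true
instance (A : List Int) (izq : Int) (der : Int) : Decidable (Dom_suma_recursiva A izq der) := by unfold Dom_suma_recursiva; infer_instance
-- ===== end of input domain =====

-- B replaces A's midpoint divide-and-conquer recursion by a single iterative
-- accumulation loop over range(izq, der+1); same O(n) work, no recursion.

-- ===== PORT A =====
-- A's recursion does not terminate when der < izq (Python hits RecursionError
-- there), so the port carries a fuel parameter; suma_recursiva supplies
-- (der - izq).toNat + 1 fuel, which suffices on every input Pre_ admits.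
def sumaFuelA : Nat → List Int → Int → Int → Int
  | 0, _, _, _ => 0
  | f + 1, A, izq, der =>
    if izq = der then
      PySem.List.pyGetD A izq 0
    else
      let m := PySem.Int.floordiv (izq + der) 2
      sumaFuelA f A izq m + sumaFuelA f A (m + 1) der

def suma_recursiva (A : List Int) (izq : Int) (der : Int) : Int :=
  sumaFuelA ((der - izq).toNat + 1) A izq der

-- ===== PORT B =====
-- s = A[izq]; for i in range(izq + 1, der + 1): s += A[i]; return s
def suma_recursiva_alt (A : List Int) (izq : Int) (der : Int) : Int :=
  (PySem.List.pyRange (izq + 1) (der + 1) 1).foldl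
    (fun s i => s + PySem.List.pyGetD A i 0) (PySem.List.pyGetD A izq 0)

-- ===== PRECONDITION & SPEC =====
-- Pre_ excludes der < izq (A's recursion never terminates: RecursionError) and
-- indices outside Python's valid range for A (IndexError in the base case).
def Pre_suma_recursiva (A : List Int) (izq : Int) (der : Int) : Prop :=
  izq ≤ der ∧ PySem.Raise.InRange A.length izq ∧ PySem.Raise.InRange A.length der
instance (A : List Int) (izq : Int) (der : Int) : Decidable (Pre_suma_recursiva A izq der) := by unfold Pre_suma_recursiva; infer_instance

def pvWitness_suma_recursiva : List Int × Int × Int := ([3, -1, 4, 1, 5], 1, 3)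

def Spec_suma_recursiva (A : List Int) (izq : Int) (der : Int) (out : Int) : Prop := out = suma_recursiva_alt A izq der
instance (A : List Int) (izq : Int) (der : Int) (out : Int) : Decidable (Spec_suma_recursiva A izq der out) := by unfold Spec_suma_recursiva; infer_instance

-- ===== CLAIM (what is proved, stated in full; the proofs are below) =====
def Claim_equal_suma_recursiva : Prop := ∀ (A : List Int) (izq : Int) (der : Int), Dom_suma_recursiva A izq der → Pre_suma_recursiva A izq der → Spec_suma_recursiva A izq der (suma_recursiva A izq der)

-- ===== LEMMAS AND PROOFS =====

-- peeling the foldl accumulator off as a sum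
lemma foldl_add_sum (g : Int → Int) (l : List Int) : ∀ s : Int,
    l.foldl (fun s i => s + g i) s = s + (l.map g).sum := by
  induction l with
  | nil => intro s; simp
  | cons x xs ih =>
    intro s
    simp only [List.foldl_cons, List.map_cons, List.sum_cons, ih]
    ring

-- B's loop as a map-sum over the whole closed interval (needs izq ≤ der).
lemma alt_eq_sum (A : List Int) (izq der : Int) (h : izq ≤ der) :
    suma_recursiva_alt A izq der
      = ((PySem.List.pyRange izq (der + 1) 1).map (fun i => PySem.List.pyGetD A i 0)).sum := by
  unfold suma_recursiva_alt
  rw [foldl_add_sum, PySem.List.pyRange_one_cons (show izq < der + 1 by omega)]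
  simp

-- splitting a unit-step range at a midpoint
lemma pyRange_split {a b c : Int} (h1 : a ≤ b) (h2 : b ≤ c) :
    PySem.List.pyRange a c 1 = PySem.List.pyRange a b 1 ++ PySem.List.pyRange b c 1 := by
  rw [PySem.List.pyRange_one, PySem.List.pyRange_one, PySem.List.pyRange_one]
  rw [show (c - a).toNat = (b - a).toNat + (c - b).toNat by omega, List.range_add]
  rw [List.map_append, List.map_map]
  congr 1
  apply List.map_congr_left
  intro k hk
  simp only [Function.comp_apply]
  push_cast
  omega

-- midpoint bounds for izq < der
lemma mid_bounds {izq der : Int} (h : izq < der) :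
    izq ≤ PySem.Int.floordiv (izq + der) 2 ∧ PySem.Int.floordiv (izq + der) 2 < der := by
  have h2 : (0:Int) < 2 := by omega
  rw [PySem.Int.floordiv_eq_ediv_of_pos h2]
  omega

-- A's fuelled recursion computes the interval sum when the fuel suffices.
lemma fuel_eq_sum (A : List Int) :
    ∀ (f : Nat) (izq der : Int), izq ≤ der → (der - izq).toNat < f →
      sumaFuelA f A izq der
        = ((PySem.List.pyRange izq (der + 1) 1).map (fun i => PySem.List.pyGetD A i 0)).sum := by
  intro f
  induction f with
  | zero => intro izq der _ hf; omega
  | succ f ih =>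
    intro izq der hle hf
    by_cases heq : izq = der
    · subst heq
      simp [sumaFuelA, PySem.List.pyRange_one_singleton]
    · have hlt : izq < der := lt_of_le_of_ne hle heq
      obtain ⟨hm1, hm2⟩ := mid_bounds hlt
      simp only [sumaFuelA, if_neg heq]
      rw [ih izq (PySem.Int.floordiv (izq + der) 2) hm1 (by omega),
          ih (PySem.Int.floordiv (izq + der) 2 + 1) der (by omega) (by omega)]
      rw [show PySem.List.pyRange izq (der + 1) 1
            = PySem.List.pyRange izq (PySem.Int.floordiv (izq + der) 2 + 1) 1
              ++ PySem.List.pyRange (PySem.Int.floordiv (izq + der) 2 + 1) (der + 1) 1 from ?_]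
      · rw [List.map_append, List.sum_append]
      · exact pyRange_split (by omega) (by omega)

-- ===== VERDICT (by name: the statement is the Claim_ definition above) =====
theorem suma_recursiva_spec : Claim_equal_suma_recursiva := by
  intro A izq der _ hpre
  obtain ⟨hle, _, _⟩ := hpre
  show _ = _
  rw [alt_eq_sum A izq der hle, suma_recursiva, fuel_eq_sum A _ izq der hle (by omega)]
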